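-- pv_equiv track=rewrite | github.com/azajay08/MOOC_Intorduction_to_Programming-Python | Intro/part04/neighbours_in_list.py | longest_series_of_neighbours
-- ===== SOURCE A (Python) =====
-- def longest_series_of_neighbours(my_list):
-- 	best = 0
-- 	i = 0
-- 	l_len = len(my_list) - 1
-- 	while i < l_len:
-- 		count = 1
-- 		while (my_list[i] - my_list[i + 1] == 1) or (my_list[i + 1] - my_list[i] == 1):
-- 			count += 1
-- 			i += 1
-- 			if i == l_len:
-- 				break
-- 		if count > best:
-- 			best = count
-- 		i += 1
-- 	return best
-- ===== SOURCE B (Python) =====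
-- def longest_series_of_neighbours(my_list):
--     # Phase 1: boolean table of adjacent pairs differing by exactly 1.
--     neighbours = [abs(a - b) == 1 for a, b in zip(my_list, my_list[1:])]
--     # Phase 2: longest run of True in the table, by a reset counter.
--     best = 0
--     cur = 0
--     for t in neighbours:
--         cur = cur + 1 if t else 0
--         if cur > best:
--             best = cur
--     return best + 1 if len(my_list) >= 2 else 0
-- ===== Notes on version B (the rewrite author's own statement) =====
-- stated objective: alternative
-- what changed: A's nested while loops with manual index run-skipping are replaced by a two-phase decomposition: build a boolean table of adjacent pairs differing by one, then a single reset-counter pass finds the longest True run (+1 for elements vs gaps).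
import Mathlib
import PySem

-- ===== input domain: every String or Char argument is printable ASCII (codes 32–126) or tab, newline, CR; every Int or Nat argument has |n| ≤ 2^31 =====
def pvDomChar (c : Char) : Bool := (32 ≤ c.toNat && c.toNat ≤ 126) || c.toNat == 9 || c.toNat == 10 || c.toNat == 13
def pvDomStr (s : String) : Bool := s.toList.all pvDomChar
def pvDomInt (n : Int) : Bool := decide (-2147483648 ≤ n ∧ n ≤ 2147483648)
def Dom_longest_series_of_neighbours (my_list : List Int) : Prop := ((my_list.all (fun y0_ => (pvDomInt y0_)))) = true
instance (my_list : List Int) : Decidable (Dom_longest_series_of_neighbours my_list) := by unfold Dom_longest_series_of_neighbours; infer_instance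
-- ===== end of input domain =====

-- B changes the decomposition: a boolean neighbour table plus a single reset-counter
-- scan replaces A's nested while loops; same O(n) cost, return value proved equal.

-- ===== PORT A =====
-- Python condition (my_list[i]-my_list[i+1]==1) or (my_list[i+1]-my_list[i]==1);
-- indices are always in range when Python evaluates it (i < l_len = len-1), so getD is exact.
def pvCond (xs : List Int) (i : Nat) : Bool :=
  (xs.getD i 0 - xs.getD (i + 1) 0 == 1) || (xs.getD (i + 1) 0 - xs.getD i 0 == 1)

-- inner while loop of A, as a structural recursion on a fuel bound (fuel = l_len - i
-- at each call site, always enough: fuel only makes the recursion total, it never cuts a loop short)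
def lsnInner (xs : List Int) (llen : Nat) : Nat → Nat → Int → Nat × Int
  | 0, i, count => (i, count)
  | fuel + 1, i, count =>
      if i < llen ∧ pvCond xs i then
        if i + 1 = llen then (i + 1, count + 1)
        else lsnInner xs llen fuel (i + 1) (count + 1)
      else (i, count)

-- outer while loop of A (fuel = l_len - i, enough since i advances by ≥ 1 per iteration);
-- the `i < llen` test is Python's `while i < l_len`, the inner condition is evaluated by lsnInner
def lsnOuter (xs : List Int) (llen : Nat) : Nat → Nat → Int → Int
  | 0, _, best => best
  | fuel + 1, i, best =>
      if i < llen then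
        let p := lsnInner xs llen (llen - i) i 1
        lsnOuter xs llen fuel (p.1 + 1) (if p.2 > best then p.2 else best)
      else best

-- Python's l_len = len(my_list)-1 is -1 on []; Nat subtraction gives 0 there and the
-- outer loop is skipped in both cases, so the value is identical.
def longest_series_of_neighbours (my_list : List Int) : Int :=
  lsnOuter my_list (my_list.length - 1) (my_list.length - 1) 0 0

-- ===== PORT B =====
-- neighbours = [abs(a-b) == 1 for a, b in zip(my_list, my_list[1:])]
def pvNb (xs : List Int) : List Bool :=
  (xs.zip xs.tail).map (fun p => (p.1 - p.2).natAbs == 1)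

-- body of Source B's for loop over (best, cur)
def pvStep (s : Int × Int) (t : Bool) : Int × Int :=
  let cur := if t then s.2 + 1 else 0
  (if cur > s.1 then cur else s.1, cur)

def longest_series_of_neighbours_alt (my_list : List Int) : Int :=
  let s := (pvNb my_list).foldl pvStep (0, 0)
  if 2 ≤ my_list.length then s.1 + 1 else 0

-- ===== PRECONDITION & SPEC =====
def Spec_longest_series_of_neighbours (my_list : List Int) (out : Int) : Prop := out = longest_series_of_neighbours_alt my_list
instance (my_list : List Int) (out : Int) : Decidable (Spec_longest_series_of_neighbours my_list out) := by unfold Spec_longest_series_of_neighbours; infer_instance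

-- ===== CLAIM (what is proved, stated in full; the proofs are below) =====
def Claim_equal_longest_series_of_neighbours : Prop := ∀ (my_list : List Int), Dom_longest_series_of_neighbours my_list → Spec_longest_series_of_neighbours my_list (longest_series_of_neighbours my_list)

-- ===== LEMMAS AND PROOFS =====

theorem nb_length (xs : List Int) : (pvNb xs).length = xs.length - 1 := by
  simp [pvNb, List.length_zip, List.length_tail]

-- length of the leading True-run of the neighbour table
def pvLead (d : List Bool) : Nat := (d.takeWhile (fun b => b)).length

-- chunk-level restatement of A's outer loop, on the neighbour table
def outerL : List Bool → Int → Int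
  | [], best => best
  | d@(_ :: _), best =>
      outerL ((d.dropWhile (fun b => b)).tail) (max best (1 + (pvLead d : Int)))
termination_by d => d.length
decreasing_by
  have := List.length_dropWhile_le (p := fun b => b) (l := d)
  simp_all [List.length_tail]

theorem pvStep_eq (s : Int × Int) (t : Bool) :
    pvStep s t = (max s.1 (if t then s.2 + 1 else 0), if t then s.2 + 1 else 0) := by
  cases t <;> simp only [pvStep, Prod.mk.injEq, Bool.false_eq_true, if_false, if_true,
    and_true] <;> rw [max_def] <;> split <;> omega

theorem cond_bridge (xs : List Int) (i : Nat) (h : i < (pvNb xs).length) :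
    pvCond xs i = (pvNb xs)[i] := by
  have hn := nb_length xs
  have hl : i + 1 < xs.length := by omega
  have h1 : i < xs.length := by omega
  have h3 : i < (xs.zip xs.tail).length := by simp [List.length_zip, List.length_tail]; omega
  simp only [pvCond, pvNb, List.getElem_map, List.getElem_zip, List.getElem_tail,
    List.getD_eq_getElem xs 0 h1, List.getD_eq_getElem xs 0 hl]
  rw [Bool.eq_iff_iff]
  simp only [Bool.or_eq_true, beq_iff_eq, Int.natAbs_eq_iff]
  push_cast
  omega

theorem drop_cons_of_lt {α : Type} (l : List α) (i : Nat) (h : i < l.length) :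
    l.drop i = l[i] :: l.drop (i + 1) := (List.getElem_cons_drop h).symm

theorem pvLead_cons (b : Bool) (t : List Bool) :
    pvLead (b :: t) = if b then 1 + pvLead t else 0 := by
  cases b
  · simp [pvLead]
  · simp [pvLead]; omega

theorem lsnInner_eq (xs : List Int) (fuel i : Nat) (count : Int)
    (hf : (pvNb xs).length - i ≤ fuel) :
    lsnInner xs (pvNb xs).length fuel i count =
      (i + pvLead ((pvNb xs).drop i), count + (pvLead ((pvNb xs).drop i) : Int)) := by
  induction fuel generalizing i count with
  | zero =>
      have hnil : (pvNb xs).drop i = [] := List.drop_eq_nil_of_le (by omega)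
      rw [lsnInner, hnil]
      simp [pvLead]
  | succ fuel ih =>
      rw [lsnInner]
      by_cases h : i < (pvNb xs).length ∧ pvCond xs i
      · have hc := cond_bridge xs i h.1
        have hd := drop_cons_of_lt (pvNb xs) i h.1
        have hL : pvLead ((pvNb xs).drop i) = 1 + pvLead ((pvNb xs).drop (i + 1)) := by
          rw [hd, pvLead_cons, ← hc, h.2]; simp
        rw [if_pos h]
        by_cases hend : i + 1 = (pvNb xs).length
        · have hnil : (pvNb xs).drop (i + 1) = [] := List.drop_eq_nil_of_le (by omega)
          rw [if_pos hend, hL, hnil]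
          simp [pvLead]
        · rw [if_neg hend, ih (i + 1) (count + 1) (by omega), hL]
          simp only [Prod.mk.injEq]
          constructor
          · omega
          · push_cast; ring
      · have hL : pvLead ((pvNb xs).drop i) = 0 := by
          by_cases hi : i < (pvNb xs).length
          · have hc := cond_bridge xs i hi
            have hd := drop_cons_of_lt (pvNb xs) i hi
            have hcf : pvCond xs i = false := by
              by_contra hcc
              exact h ⟨hi, by simpa using hcc⟩
            rw [hd, pvLead_cons, ← hc, hcf]
            simp
          · rw [List.drop_eq_nil_of_le (by omega)]; simp [pvLead]
        rw [if_neg h, hL]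
        simp

theorem outerL_cons (b : Bool) (t : List Bool) (best : Int) :
    outerL (b :: t) best =
      outerL (((b :: t).dropWhile (fun x => x)).tail) (max best (1 + (pvLead (b :: t) : Int))) := by
  rw [outerL]

theorem dropWhile_eq_drop {α : Type} (p : α → Bool) (l : List α) :
    l.dropWhile p = l.drop (l.takeWhile p).length := by
  induction l with
  | nil => rfl
  | cons a l ih =>
      by_cases h : p a <;> simp [h, ih]

theorem dropWhile_drop_lead (d : List Bool) (i : Nat) :
    (d.drop i).dropWhile (fun x => x) = d.drop (i + pvLead (d.drop i)) := by
  rw [dropWhile_eq_drop, List.drop_drop]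
  rfl

theorem lsnOuter_eq (xs : List Int) (fuel i : Nat) (best : Int)
    (hf : (pvNb xs).length - i ≤ fuel) :
    lsnOuter xs (pvNb xs).length fuel i best = outerL ((pvNb xs).drop i) best := by
  induction fuel generalizing i best with
  | zero =>
      rw [lsnOuter, List.drop_eq_nil_of_le (by omega), outerL]
  | succ fuel ih =>
      rw [lsnOuter]
      by_cases h : i < (pvNb xs).length
      · rw [if_pos h]
        have hp := lsnInner_eq xs ((pvNb xs).length - i) i 1 (by omega)
        simp only [hp]
        have hd := drop_cons_of_lt (pvNb xs) i h
        rw [ih _ _ (by omega), hd, outerL_cons, ← hd, dropWhile_drop_lead, List.tail_drop]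
        have hm : (if 1 + (pvLead ((pvNb xs).drop i) : Int) > best then
            1 + (pvLead ((pvNb xs).drop i) : Int) else best) =
            max best (1 + (pvLead ((pvNb xs).drop i) : Int)) := by
          split <;> omega
        rw [hm]
      · rw [if_neg h, List.drop_eq_nil_of_le (by omega), outerL]

theorem pvStep_fst_mono (d : List Bool) (b c : Int) :
    b ≤ (d.foldl pvStep (b, c)).1 := by
  induction d generalizing b c with
  | nil => simp
  | cons t rest ih =>
      simp only [List.foldl_cons, pvStep]
      refine le_trans ?_ (ih _ _)
      split <;> omega

theorem foldl_chunk (d : List Bool) (b c : Int) (hc : 0 ≤ c) (hb : c ≤ b) :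
    (d.foldl pvStep (b, c)).1 =
      max (max b (c + (pvLead d : Int)))
        (((d.dropWhile (fun b => b)).tail).foldl pvStep ((0 : Int), (0 : Int))).1 := by
  induction d generalizing b c with
  | nil => simp [pvLead]; omega
  | cons t rest ih =>
      cases t with
      | true =>
          rw [List.foldl_cons, pvStep_eq]
          simp only [if_true]
          rw [ih (max b (c + 1)) (c + 1) (by omega) (by omega), pvLead_cons]
          simp only [if_true, List.dropWhile_cons]
          push_cast
          omega
      | false =>
          rw [List.foldl_cons, pvStep_eq]
          simp only [Bool.false_eq_true, if_false]
          have hb0 : max b 0 = b := by omega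
          rw [hb0, ih b 0 le_rfl (by omega), pvLead_cons]
          simp only [Bool.false_eq_true, if_false, List.dropWhile_cons, List.tail_cons]
          have h2 := ih 0 0 le_rfl le_rfl
          have h3 := pvStep_fst_mono ((rest.dropWhile (fun b => b)).tail) 0 0
          rw [h2]
          push_cast
          omega

theorem outerL_eq (d : List Bool) (best : Int) :
    outerL d best =
      if d = [] then best else max best ((d.foldl pvStep ((0 : Int), (0 : Int))).1 + 1) := by
  fun_induction outerL d best with
  | case1 best => simp
  | case2 b t best ih =>
      rw [ih]
      have hch := foldl_chunk (b :: t) 0 0 le_rfl le_rfl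
      simp only [zero_add] at hch
      have hl0 : (0 : Int) ≤ (pvLead (b :: t) : Int) := by positivity
      by_cases hT : ((b :: t).dropWhile (fun b => b)).tail = []
      · rw [hT] at hch
        simp only [List.foldl_nil] at hch
        rw [if_pos hT, if_neg (List.cons_ne_nil b t), hch]
        omega
      · rw [if_neg hT, if_neg (List.cons_ne_nil b t), hch]
        have h3 := pvStep_fst_mono (((b :: t).dropWhile (fun b => b)).tail) 0 0
        omega

-- ===== VERDICT (by name: the statement is the Claim_ definition above) =====
theorem longest_series_of_neighbours_spec : Claim_equal_longest_series_of_neighbours := by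
  intro xs _
  show _ = _
  unfold longest_series_of_neighbours longest_series_of_neighbours_alt
  rw [← nb_length xs, lsnOuter_eq xs ((pvNb xs).length) 0 0 (by omega), List.drop_zero, outerL_eq]
  have hlen := nb_length xs
  by_cases h : pvNb xs = []
  · have : ¬ 2 ≤ xs.length := by
      intro hx; rw [h] at hlen; simp at hlen; omega
    simp [h, this]
  · have h2 : 2 ≤ xs.length := by
      rcases Nat.lt_or_ge xs.length 2 with hx | hx
      · exfalso; apply h; have : (pvNb xs).length = 0 := by omega
        exact List.eq_nil_of_length_eq_zero this
      · exact hx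
    have := pvStep_fst_mono (pvNb xs) 0 0
    simp only [if_neg h, if_pos h2]
    omega
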